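-- pv_equiv track=rewrite | github.com/JaGallup/encpoly | src/encpoly/codec.py | decode_coords
-- ===== SOURCE A (Python) =====
-- def decode_coords(polyline):
--     """
--     Yield alternating latitude and longitude values from a polyline.
--
--     Each coordinate is an offset from the last of its type, and has yet
--     to be converted from its stored integer value to a floating point
--     coordinate (see steps 1 and 2 of the encoding algorithm).
--
--     Tip:
--         You probably want to use :func:`encpoly.decode` instead, as that
--         function returns lat/lon pairs with offset and precision handled
--         correctly.
--
--     >>> tuple(decode_coords("_p~iF~ps|U_ulLnnqC_mqNvxq`@"))
--     (3850000, -12020000, 220000, -75000, 255200, -550300)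
--
--     Args:
--         polyline (str): encoded polyline to decode
--
--     Yields:
--         iterable of alternating lat/lon coordinates
--     """
--     coord = 0
--     shift = 0
--     for char in map(ord, polyline):
--         char -= 63
--         coord |= (char & 0x1F) << shift
--         shift += 5
--         if char < 0x20:
--             if coord & 1:
--                 yield ~coord >> 1
--             else:
--                 yield coord >> 1
--             coord = 0
--             shift = 0
-- ===== SOURCE B (Python) =====
-- def decode_coords(polyline):
--     """Two-phase decode: first partition the character values into complete
--     5-bit-chunk groups (each ending at its terminator, dropping any trailing
--     partial group), then decode each group back-to-front by Horner's rule."""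
--     groups = []
--     cur = []
--     for c in polyline:
--         v = ord(c) - 63
--         cur.append(v % 32)
--         if v < 0x20:
--             groups.append(cur)
--             cur = []
--     # a trailing partial group in `cur` never reached a terminator: discard it
--     for g in groups:
--         coord = 0
--         for chunk in reversed(g):
--             coord = coord * 32 + chunk
--         yield (-coord - 1) // 2 if coord % 2 else coord // 2
-- ===== Notes on version B (the rewrite author's own statement) =====
-- stated objective: alternative
-- what changed: A decodes in a single pass with an OR/shift big-integer accumulator flushed at each terminator; B first partitions the character values into complete chunk groups (discarding a trailing partial group) and then decodes each group back-to-front by Horner's rule with plain modular arithmetic.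
import Mathlib
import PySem

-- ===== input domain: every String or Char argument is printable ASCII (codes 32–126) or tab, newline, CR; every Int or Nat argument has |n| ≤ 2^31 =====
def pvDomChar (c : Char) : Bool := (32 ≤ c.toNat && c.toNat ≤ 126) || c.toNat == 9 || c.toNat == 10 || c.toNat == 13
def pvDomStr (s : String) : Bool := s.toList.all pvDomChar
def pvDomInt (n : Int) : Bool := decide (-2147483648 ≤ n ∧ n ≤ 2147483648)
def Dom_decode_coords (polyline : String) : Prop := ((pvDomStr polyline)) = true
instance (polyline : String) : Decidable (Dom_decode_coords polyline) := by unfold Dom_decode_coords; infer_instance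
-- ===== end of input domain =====

-- B re-decomposes A's single accumulating loop into two phases — partition the
-- character values into complete chunk groups, then decode each group back-to-front
-- by Horner's rule with plain arithmetic (objective: alternative; return value only,
-- both Pythons are generators consumed into a list).

-- ===== PORT A =====
-- state: (coord, shift, emitted)
def decodeA_step (st : Int × Nat × List Int) (c : Char) : Int × Nat × List Int :=
  let ch := (c.toNat : Int) - 63
  let coord := PySem.Int.bor st.1 ((PySem.Int.band ch 0x1F) <<< st.2.1)
  let shift := st.2.1 + 5
  if ch < 0x20 then
    if PySem.Int.band coord 1 ≠ 0 then
      (0, 0, st.2.2 ++ [(Int.not coord) >>> (1:Nat)])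
    else
      (0, 0, st.2.2 ++ [coord >>> (1:Nat)])
  else (coord, shift, st.2.2)

def decode_coords (polyline : String) : List Int :=
  (polyline.toList.foldl decodeA_step (0, 0, [])).2.2

-- ===== PORT B =====
-- phase 1: the complete groups of 5-bit chunks (trailing partial group discarded)
def pyGroupChunks : List Char → List Int → List (List Int)
  | [], _cur => []
  | c :: cs, cur =>
    let v := (c.toNat : Int) - 63
    let cur' := cur ++ [PySem.Int.mod v 32]
    if v < 0x20 then cur' :: pyGroupChunks cs [] else pyGroupChunks cs cur'

-- phase 2: Horner back-to-front, then the zig-zag sign rule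
def decodeGroup (g : List Int) : Int :=
  let coord := g.reverse.foldl (fun coord chunk => coord * 32 + chunk) 0
  if PySem.Int.mod coord 2 ≠ 0 then PySem.Int.floordiv (-coord - 1) 2
  else PySem.Int.floordiv coord 2

def decode_coords_alt (polyline : String) : List Int :=
  (pyGroupChunks polyline.toList []).map decodeGroup

-- ===== PRECONDITION & SPEC =====
def Spec_decode_coords (polyline : String) (out : List Int) : Prop := out = decode_coords_alt polyline
instance (polyline : String) (out : List Int) : Decidable (Spec_decode_coords polyline out) := by unfold Spec_decode_coords; infer_instance

-- ===== CLAIM (what is proved, stated in full; the proofs are below) =====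
def Claim_equal_decode_coords : Prop := ∀ (polyline : String), Dom_decode_coords polyline → Spec_decode_coords polyline (decode_coords polyline)

-- ===== LEMMAS AND PROOFS =====

-- the value a chunk list denotes: Σ gᵢ * 32^i
def pvHval (g : List Int) : Int := g.foldr (fun k c => c * 32 + k) 0

lemma pvHval_append (g : List Int) (k : Int) :
    pvHval (g ++ [k]) = pvHval g + k * 32 ^ g.length := by
  induction g with
  | nil => simp [pvHval]
  | cons x g ih =>
    simp only [pvHval, List.cons_append, List.foldr_cons, List.length_cons] at *
    rw [ih]; ring

lemma pvHval_bounds (g : List Int) (h : ∀ x ∈ g, 0 ≤ x ∧ x < 32) :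
    0 ≤ pvHval g ∧ pvHval g < 32 ^ g.length := by
  induction g with
  | nil => simp [pvHval]
  | cons x g ih =>
    have hx := h x (by simp)
    have ih' := ih (fun y hy => h y (by simp [hy]))
    simp only [pvHval, List.foldr_cons, List.length_cons] at *
    constructor
    · nlinarith [ih'.1, hx.1]
    · have : (32:Int) ^ (g.length + 1) = 32 ^ g.length * 32 := by ring
      rw [this]; nlinarith [ih'.2, hx.2, ih'.1]

lemma pvNot_eq (x : Int) : Int.not x = -x - 1 := by
  cases x with
  | ofNat n =>
    show Int.negSucc n = -(Int.ofNat n) - 1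
    simp only [Int.ofNat_eq_natCast, Int.negSucc_eq]; ring
  | negSucc n =>
    show (Int.ofNat n) = -(Int.negSucc n) - 1
    simp only [Int.ofNat_eq_natCast, Int.negSucc_eq]; ring

lemma pvShr1 (x : Int) : x >>> (1:Nat) = PySem.Int.floordiv x 2 := by
  rw [Int.shiftRight_eq_div_pow, PySem.Int.floordiv_eq_ediv_of_pos (by norm_num)]
  norm_num

lemma pvBand31 (v : Int) : PySem.Int.band v 31 = PySem.Int.mod v 32 := by
  rw [PySem.Int.mod_eq_emod_of_pos (by norm_num)]
  by_cases h : 0 ≤ v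
  · simp only [PySem.Int.band, if_pos h, if_pos (show (0:Int) ≤ 31 by norm_num)]
    have h31 : (31:Int).toNat = 2 ^ 5 - 1 := by decide
    rw [h31, Nat.and_two_pow_sub_one_eq_mod]
    omega
  · simp only [PySem.Int.band, if_neg h, if_pos (show (0:Int) ≤ 31 by norm_num)]
    have h31 : (31:Int).toNat = 2 ^ 5 - 1 := by decide
    rw [h31, Nat.and_comm, Nat.and_two_pow_sub_one_eq_mod]
    omega

lemma pvNatOrShift (p q n : Nat) (h : p < 2 ^ n) :
    p ||| (q <<< n) = p + q * 2 ^ n := by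
  have hr : p + q * 2 ^ n = 2 ^ n * q + p := by ring
  apply Nat.eq_of_testBit_eq
  intro j
  rw [hr, Nat.testBit_two_pow_mul_add q h j, Nat.testBit_lor, Nat.testBit_shiftLeft]
  by_cases hj : j < n
  · simp [hj, Nat.not_le.mpr hj]
  · have hn : n ≤ j := Nat.not_lt.mp hj
    have : p.testBit j = false :=
      Nat.testBit_lt_two_pow (lt_of_lt_of_le h (Nat.pow_le_pow_right (by norm_num) hn))
    simp [hj, hn, this]

lemma pvOrShift (a b : Int) (n : Nat) (h0 : 0 ≤ a) (h1 : a < 2 ^ n) (hb : 0 ≤ b) :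
    PySem.Int.bor a (b <<< n) = a + b * 2 ^ n := by
  obtain ⟨p, rfl⟩ : ∃ p : Nat, a = (p : Int) := ⟨a.toNat, (Int.toNat_of_nonneg h0).symm⟩
  obtain ⟨q, rfl⟩ : ∃ q : Nat, b = (q : Int) := ⟨b.toNat, (Int.toNat_of_nonneg hb).symm⟩
  have hp : p < 2 ^ n := by exact_mod_cast h1
  rw [← Int.natCast_shiftLeft, PySem.Int.bor_natCast, pvNatOrShift p q n hp]
  push_cast
  ring

lemma pvDecodeGroup_eq (g : List Int) :
    decodeGroup g = if PySem.Int.mod (pvHval g) 2 ≠ 0 then PySem.Int.floordiv (-(pvHval g) - 1) 2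
      else PySem.Int.floordiv (pvHval g) 2 := by
  simp only [decodeGroup, List.foldl_reverse, pvHval]

lemma pvLoop_eq (cs : List Char) : ∀ (cur acc : List Int),
    (∀ x ∈ cur, 0 ≤ x ∧ x < 32) →
    (List.foldl decodeA_step (pvHval cur, 5 * cur.length, acc) cs).2.2
      = acc ++ (pyGroupChunks cs cur).map decodeGroup := by
  induction cs with
  | nil => intro cur acc _; simp [pyGroupChunks]
  | cons c cs ih =>
    intro cur acc hcur
    have hb := pvHval_bounds cur hcur
    have hpow : (2:Int) ^ (5 * cur.length) = 32 ^ cur.length := by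
      rw [pow_mul]; norm_num
    have hch := pvBand31 ((c.toNat : Int) - 63)
    have hmn := PySem.Int.mod_nonneg ((c.toNat : Int) - 63) (show (0:Int) < 32 by norm_num)
    have hml := PySem.Int.mod_lt ((c.toNat : Int) - 63) (show (0:Int) < 32 by norm_num)
    have hcoord : PySem.Int.bor (pvHval cur)
        ((PySem.Int.band ((c.toNat : Int) - 63) 0x1F) <<< (5 * cur.length))
        = pvHval (cur ++ [PySem.Int.mod ((c.toNat : Int) - 63) 32]) := by
      rw [show (0x1F : Int) = 31 from rfl, hch,
        pvOrShift _ _ _ hb.1 (by rw [hpow]; exact hb.2) hmn, pvHval_append, hpow]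
    rw [List.foldl_cons]
    show (List.foldl decodeA_step (decodeA_step (pvHval cur, 5 * cur.length, acc) c) cs).2.2 = _
    simp only [decodeA_step, hcoord]
    by_cases hlt : (c.toNat : Int) - 63 < 0x20
    · rw [if_pos hlt]
      set g := cur ++ [PySem.Int.mod ((c.toNat : Int) - 63) 32] with hg
      have hrhs : pyGroupChunks (c :: cs) cur = g :: pyGroupChunks cs [] := by
        rw [hg]; simp only [pyGroupChunks]; rw [if_pos hlt]
      have key : ∀ out : Int,
          (List.foldl decodeA_step ((0:Int), (0:Nat), acc ++ [out]) cs).2.2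
            = (acc ++ [out]) ++ (pyGroupChunks cs []).map decodeGroup := by
        intro out
        simpa [pvHval] using ih [] (acc ++ [out]) (by simp)
      have hpar := PySem.Int.band_one (pvHval g)
      split_ifs with hif
      · rw [key, hrhs]
        have hv : Int.not (pvHval g) >>> (1:Nat) = decodeGroup g := by
          rw [pvDecodeGroup_eq, if_pos (by rw [← hpar]; exact hif), pvNot_eq, pvShr1]
        rw [hv]; simp
      · rw [key, hrhs]
        have hv : pvHval g >>> (1:Nat) = decodeGroup g := by
          rw [pvDecodeGroup_eq, if_neg (by rw [← hpar]; exact hif), pvShr1]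
        rw [hv]; simp
    · rw [if_neg hlt]
      have hlen : 5 * cur.length + 5
          = 5 * (cur ++ [PySem.Int.mod ((c.toNat : Int) - 63) 32]).length := by
        simp; ring
      rw [hlen, ih _ acc (by
        intro x hx
        rcases List.mem_append.mp hx with h | h
        · exact hcur x h
        · simp only [List.mem_singleton] at h; subst h; exact ⟨hmn, hml⟩)]
      simp [pyGroupChunks, hlt]

-- ===== VERDICT (by name: the statement is the Claim_ definition above) =====
theorem decode_coords_spec : Claim_equal_decode_coords := by
  intro polyline _
  show decode_coords polyline = decode_coords_alt polyline
  unfold decode_coords decode_coords_alt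
  have h := pvLoop_eq polyline.toList [] [] (by simp)
  simpa [pvHval] using h
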